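-- pv_equiv track=rewrite | github.com/Purota/cp_algo | sheet/junior/a/0011-sereja_and_dima.py | sereja_and_dima
-- ===== SOURCE A (Python) =====
-- def sereja_and_dima(c, n):
--     s = d = 0
--     s_turn = n % 2
--     while n > 0:
--         c_n = c[0]
--         i = 0
--         if c_n < c[-1]:
--             c_n = c[-1]
--             i = -1
--         c.pop(i)
--         if n % 2 == s_turn:
--             s += c_n
--         else:
--             d += c_n
--         n -= 1
--     return s, d
-- ===== SOURCE B (Python) =====
-- def sereja_and_dima(c, n):
--     # Two index pointers into c instead of popping (no O(n) list shifts, c left unmodified);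
--     # selections are recorded in order and then distributed by a reverse swap-fold
--     # (the head pick always lands on Sereja) instead of per-turn parity arithmetic.
--     i, j = 0, len(c) - 1
--     picks = []
--     for _ in range(max(n, 0)):
--         if c[i] >= c[j]:
--             picks.append(c[i])
--             i += 1
--         else:
--             picks.append(c[j])
--             j -= 1
--     s = d = 0
--     for v in reversed(picks):
--         s, d = v + d, s
--     return s, d
-- ===== Notes on version B (the rewrite author's own statement) =====
-- stated objective: faster
-- what changed: B walks the list with two index pointers and records the picks, then splits them between the players by a reverse swap-fold, instead of A's per-turn parity test with pop(0)/pop(-1) mutations that shift the whole list each turn.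
import Mathlib
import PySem

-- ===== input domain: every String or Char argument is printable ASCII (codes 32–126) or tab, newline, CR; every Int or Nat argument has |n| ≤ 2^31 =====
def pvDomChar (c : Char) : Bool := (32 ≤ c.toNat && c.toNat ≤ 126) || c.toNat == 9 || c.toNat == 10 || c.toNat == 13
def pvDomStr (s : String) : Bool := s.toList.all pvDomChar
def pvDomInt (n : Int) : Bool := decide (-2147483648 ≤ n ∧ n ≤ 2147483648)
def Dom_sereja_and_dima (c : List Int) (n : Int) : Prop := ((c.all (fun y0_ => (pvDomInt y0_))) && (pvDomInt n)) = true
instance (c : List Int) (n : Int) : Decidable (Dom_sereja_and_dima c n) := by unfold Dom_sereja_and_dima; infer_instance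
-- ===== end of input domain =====

-- B replaces A's pop-both-ends loop with two index pointers into an unchanged list plus a
-- reverse swap-fold over the recorded picks (no per-turn parity test, no list mutation);
-- A empties the list c in place and B does not, so the equivalence proved here is about
-- the return value only.

-- ===== PORT A =====
-- A's while-loop; fuel = n.toNat, since the loop runs exactly n times when no IndexError occurs
def sereja_and_dima_go : Nat → List Int → Int → Int → Int → Int → Int × Int
  | 0, _, _, _, s, d => (s, d)
  | fuel+1, c, n, s_turn, s, d =>
    if n > 0 then
      let c_n0 := (PySem.List.pyGet? c 0).getD 0
      let clast := (PySem.List.pyGet? c (-1)).getD 0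
      let cni : Int × Int := if c_n0 < clast then (clast, -1) else (c_n0, 0)
      let c' := ((PySem.List.pop? c cni.2).map Prod.snd).getD []
      if n % 2 == s_turn then
        sereja_and_dima_go fuel c' (n - 1) s_turn (s + cni.1) d
      else
        sereja_and_dima_go fuel c' (n - 1) s_turn s (d + cni.1)
    else (s, d)

def sereja_and_dima (c : List Int) (n : Int) : Int × Int :=
  sereja_and_dima_go n.toNat c n (n % 2) 0 0

-- ===== PORT B =====
-- B's two-pointer picking loop: for _ in range(max(n,0)): compare c[i], c[j], record the pick
def sereja_and_dima_alt_pick : List Int → Int → Int → Nat → List Int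
  | _, _, _, 0 => []
  | c, i, j, k+1 =>
    let a := (PySem.List.pyGet? c i).getD 0
    let b := (PySem.List.pyGet? c j).getD 0
    if a ≥ b then a :: sereja_and_dima_alt_pick c (i+1) j k
    else b :: sereja_and_dima_alt_pick c i (j-1) k

-- B's second phase: for v in reversed(picks): s, d = v + d, s
def sereja_and_dima_alt (c : List Int) (n : Int) : Int × Int :=
  let picks := sereja_and_dima_alt_pick c 0 ((c.length : Int) - 1) (max n 0).toNat
  picks.foldr (fun v sd => (v + sd.2, sd.1)) (0, 0)

-- ===== PRECONDITION & SPEC =====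
-- A pops n times from c, so it raises IndexError exactly when n > len(c); only those inputs are excluded.
def Pre_sereja_and_dima (c : List Int) (n : Int) : Prop := n ≤ (c.length : Int)
instance (c : List Int) (n : Int) : Decidable (Pre_sereja_and_dima c n) := by
  unfold Pre_sereja_and_dima; infer_instance

def pvWitness_sereja_and_dima : List Int × Int := ([4, 1, 2, 10], 4)

def Spec_sereja_and_dima (c : List Int) (n : Int) (out : Int × Int) : Prop := out = sereja_and_dima_alt c n
instance (c : List Int) (n : Int) (out : Int × Int) : Decidable (Spec_sereja_and_dima c n out) := by unfold Spec_sereja_and_dima; infer_instance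

-- ===== CLAIM (what is proved, stated in full; the proofs are below) =====
def Claim_equal_sereja_and_dima : Prop := ∀ (c : List Int) (n : Int), Dom_sereja_and_dima c n → Pre_sereja_and_dima c n → Spec_sereja_and_dima c n (sereja_and_dima c n)

-- ===== LEMMAS AND PROOFS =====

-- The picks produced by A's greedy choices (mirrors A's pick/pop step exactly)
def pvGpicks : List Int → Nat → List Int
  | _, 0 => []
  | c, k+1 =>
    let a := (PySem.List.pyGet? c 0).getD 0
    let b := (PySem.List.pyGet? c (-1)).getD 0
    if a < b then b :: pvGpicks (((PySem.List.pop? c (-1)).map Prod.snd).getD []) k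
    else a :: pvGpicks (((PySem.List.pop? c 0).map Prod.snd).getD []) k

def pvFold (l : List Int) : Int × Int := l.foldr (fun v sd => (v + sd.2, sd.1)) (0, 0)

theorem pvFold_cons (v : Int) (l : List Int) :
    pvFold (v :: l) = (v + (pvFold l).2, (pvFold l).1) := rfl

-- A's loop distributes the greedy picks alternately, starting with s (Sereja)
theorem pvA_fold (k : Nat) : ∀ (c : List Int) (s_turn s d : Int),
    (s_turn = 0 ∨ s_turn = 1) →
    sereja_and_dima_go k c (k : Int) s_turn s d =
      if ((k : Int) % 2 == s_turn) = true
      then (s + (pvFold (pvGpicks c k)).1, d + (pvFold (pvGpicks c k)).2)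
      else (s + (pvFold (pvGpicks c k)).2, d + (pvFold (pvGpicks c k)).1) := by
  induction k with
  | zero =>
    intro c s_turn s d _
    by_cases h : (((0:Nat) : Int) % 2 == s_turn) = true <;>
      simp [sereja_and_dima_go, pvGpicks, pvFold]
  | succ k ih =>
    intro c s_turn s d hst
    have hq : ((k:Int) % 2 = 0) ∨ ((k:Int) % 2 = 1) := by omega
    have hflip : ((((k+1:Nat)) : Int) % 2 == s_turn) = !(((k : Int)) % 2 == s_turn) := by
      have h2 : (((k+1:Nat)) : Int) = (k:Int) + 1 := by push_cast; ring
      have e1 : ((k:Int)+1) % 2 = 1 - (k:Int) % 2 := by omega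
      rw [h2, e1]
      rcases hst with h|h <;> rcases hq with h'|h' <;> rw [h, h'] <;> decide
    simp only [sereja_and_dima_go, pvGpicks]
    rw [if_pos (by push_cast; omega : (((k+1:Nat)) : Int) > 0)]
    have h2 : (((k+1:Nat)) : Int) - 1 = (k:Int) := by push_cast; ring
    rw [h2, hflip]
    by_cases hab : (PySem.List.pyGet? c 0).getD 0 < (PySem.List.pyGet? c (-1)).getD 0 <;>
    by_cases hc : (((k : Int)) % 2 == s_turn) = true <;>
      simp [hab, hc, ih _ s_turn _ _ hst, pvFold_cons] <;> ring_nf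

theorem pvTailTake {α : Type} (l : List α) (n : Nat) :
    (l.take (n+1)).tail = l.tail.take n := by cases l <;> simp

-- B's two pointers walk exactly the sublist A would still hold after its pops
theorem pvPick_eq (k : Nat) : ∀ (cs : List Int) (i j : Nat),
    i + k ≤ j + 1 → j < cs.length →
    sereja_and_dima_alt_pick cs (i : Int) (j : Int) k =
      pvGpicks ((cs.drop i).take (j + 1 - i)) k := by
  induction k with
  | zero => intro cs i j _ _; simp [sereja_and_dima_alt_pick, pvGpicks]
  | succ k ih =>
    intro cs i j h1 h2
    have hij : i ≤ j := by omega
    have hi : i < cs.length := by omega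
    have hLlen : ((cs.drop i).take (j + 1 - i)).length = j + 1 - i := by
      simp [List.length_take, List.length_drop]; omega
    have hLne : (cs.drop i).take (j + 1 - i) ≠ [] := by
      intro h; rw [h] at hLlen; simp at hLlen; omega
    have hgetL : ∀ m : Nat, m < j + 1 - i →
        ((cs.drop i).take (j + 1 - i))[m]? = cs[i + m]? := by
      intro m hm
      rw [List.getElem?_take_of_lt hm, List.getElem?_drop]
    have ha : (PySem.List.pyGet? cs (i : Int)).getD 0 = cs[i] := by
      simp [PySem.List.pyGet?_natCast, List.getElem?_eq_getElem hi]
    have hb : (PySem.List.pyGet? cs (j : Int)).getD 0 = cs[j] := by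
      simp [PySem.List.pyGet?_natCast, List.getElem?_eq_getElem h2]
    have ha' : (PySem.List.pyGet? ((cs.drop i).take (j + 1 - i)) 0).getD 0 = cs[i] := by
      rw [PySem.List.pyGet?_zero, hgetL 0 (by omega),
        List.getElem?_eq_getElem (show i + 0 < cs.length by omega)]
      simp
    have hb' : (PySem.List.pyGet? ((cs.drop i).take (j + 1 - i)) (-1)).getD 0 = cs[j] := by
      rw [PySem.List.pyGet?_neg_one, List.getLast?_eq_getElem?, hLlen,
        show j + 1 - i - 1 = j - i from by omega, hgetL (j - i) (by omega),
        List.getElem?_eq_getElem (show i + (j - i) < cs.length by omega)]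
      simp [show i + (j - i) = j from by omega]
    have htail : ((PySem.List.pop? ((cs.drop i).take (j + 1 - i)) 0).map Prod.snd).getD [] =
        (cs.drop (i + 1)).take (j - i) := by
      obtain ⟨x, t, hx⟩ := List.exists_cons_of_ne_nil hLne
      have ht : t = ((cs.drop i).take (j + 1 - i)).tail := by rw [hx, List.tail_cons]
      rw [hx, PySem.List.pop?_zero_cons, Option.map_some, Option.getD_some, ht,
        show j + 1 - i = (j - i) + 1 from by omega, pvTailTake, List.tail_drop]
    have hdrop : ((PySem.List.pop? ((cs.drop i).take (j + 1 - i)) (-1)).map Prod.snd).getD [] =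
        (cs.drop i).take (j - i) := by
      have hsplit := (List.dropLast_append_getLast hLne).symm
      conv_lhs => rw [hsplit]
      rw [PySem.List.pop?_last, Option.map_some, Option.getD_some,
        List.dropLast_eq_take, hLlen, List.take_take,
        show min (j + 1 - i - 1) (j + 1 - i) = j - i from by omega]
    simp only [sereja_and_dima_alt_pick, pvGpicks, ha, hb, ha', hb', htail, hdrop]
    by_cases hab : cs[i] ≥ cs[j]
    · rw [if_pos hab, if_neg (by omega : ¬ cs[i] < cs[j])]
      rw [show (i : Int) + 1 = ((i + 1 : Nat) : Int) from by push_cast; ring,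
        ih cs (i + 1) j (by omega) h2, show j + 1 - (i + 1) = j - i from by omega]
    · rw [if_neg hab, if_pos (by omega : cs[i] < cs[j])]
      have hij' : i < j := by
        rcases Nat.lt_or_ge i j with h | h
        · exact h
        · have he : i = j := by omega
          subst he; omega
      rw [show (j : Int) - 1 = ((j - 1 : Nat) : Int) from by omega,
        ih cs i (j - 1) (by omega) (by omega),
        show j - 1 + 1 - i = j - i from by omega]

-- ===== VERDICT (by name: the statement is the Claim_ definition above) =====
theorem sereja_and_dima_spec : Claim_equal_sereja_and_dima := by
  intro c n _ hpre
  unfold Pre_sereja_and_dima at hpre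
  unfold Spec_sereja_and_dima sereja_and_dima sereja_and_dima_alt
  by_cases hn : n ≤ 0
  · rw [show n.toNat = 0 from by omega, show (max n 0).toNat = 0 from by omega]
    simp [sereja_and_dima_go, sereja_and_dima_alt_pick]
  · have hkn : (n.toNat : Int) = n := by omega
    have hst : n % 2 = 0 ∨ n % 2 = 1 := by omega
    have hA := pvA_fold n.toNat c (n % 2) 0 0 hst
    rw [hkn] at hA
    rw [if_pos (by simp : ((n % 2) == (n % 2)) = true)] at hA
    have hB : sereja_and_dima_alt_pick c 0 ((c.length : Int) - 1) n.toNat =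
        pvGpicks c n.toNat := by
      have hlen1 : 1 ≤ c.length := by omega
      have h := pvPick_eq n.toNat c 0 (c.length - 1) (by omega) (by omega)
      have hj : ((c.length - 1 : Nat) : Int) = (c.length : Int) - 1 := by omega
      rw [hj] at h
      simpa [show c.length - 1 + 1 - 0 = c.length from by omega, List.take_length] using h
    rw [show (max n 0).toNat = n.toNat from by omega, hA, hB]
    show _ = pvFold (pvGpicks c n.toNat)
    simp
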